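-- pv_equiv track=rewrite | github.com/Conor-Long/cis129-projects | CIS129_FinalProject_ConorLong.py | applyResources
-- ===== SOURCE A (Python) =====
-- def applyResources(field, seedCost, waterCost, fertilizerCost, density, waterReq, fertReq):
--
--     # Sets initial values for total costs.
--     totalSeedCost = 0
--     totalWaterCost = 0
--     totalFertilizerCost = 0
--
--     # Iterates over all grid spaces.
--     for row in field:
--         for cell in row:
--
--             # Simulates applying seeds, water, and fertilizer.
--             cell['seeds'] = True
--             cell['water'] = True
--             cell['fertilizer'] = True
--
--             # Adds the cost of resources to the total cost.
--             if cell['seeds']: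
--                 totalSeedCost += seedCost * density
--             if cell['water']:
--                 totalWaterCost += waterCost * waterReq
--             if cell['fertilizer']:
--                 totalFertilizerCost += fertilizerCost * fertReq
--
--     # Returns costs.
--     return totalSeedCost, totalWaterCost, totalFertilizerCost
-- ===== SOURCE B (Python) =====
-- def applyResources(field, seedCost, waterCost, fertilizerCost, density, waterReq, fertReq):
--     # Mark every cell (same in-place side effect as A), counting cells as we go.
--     count = 0
--     for row in field:
--         for cell in row:
--             cell['seeds'] = cell['water'] = cell['fertilizer'] = True
--         count += len(row)
--     # Closed-form totals: one multiplication per resource.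
--     return seedCost * density * count, waterCost * waterReq * count, fertilizerCost * fertReq * count
-- ===== Notes on version B (the rewrite author's own statement) =====
-- stated objective: simpler
-- what changed: B keeps the mandatory per-cell marking pass but drops the per-cell conditional accumulators, computing the three totals in closed form as resourceCost*requirement*cellCount.
import Mathlib
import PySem

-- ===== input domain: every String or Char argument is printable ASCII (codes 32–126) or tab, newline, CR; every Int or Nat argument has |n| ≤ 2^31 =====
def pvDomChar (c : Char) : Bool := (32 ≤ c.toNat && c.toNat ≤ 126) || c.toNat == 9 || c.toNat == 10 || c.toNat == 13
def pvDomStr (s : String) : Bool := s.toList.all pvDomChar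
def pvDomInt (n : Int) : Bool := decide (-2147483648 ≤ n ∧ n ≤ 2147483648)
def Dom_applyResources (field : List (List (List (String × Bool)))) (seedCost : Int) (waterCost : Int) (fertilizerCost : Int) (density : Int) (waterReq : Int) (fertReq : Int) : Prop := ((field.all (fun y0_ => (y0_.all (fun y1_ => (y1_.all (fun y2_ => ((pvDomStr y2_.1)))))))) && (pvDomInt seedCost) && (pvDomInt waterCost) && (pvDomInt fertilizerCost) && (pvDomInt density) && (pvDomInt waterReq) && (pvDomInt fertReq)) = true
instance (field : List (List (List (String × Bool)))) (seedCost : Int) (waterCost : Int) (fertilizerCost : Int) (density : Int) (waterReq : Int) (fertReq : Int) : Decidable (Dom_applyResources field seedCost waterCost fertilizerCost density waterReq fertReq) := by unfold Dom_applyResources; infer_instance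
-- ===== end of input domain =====

-- ===== PORT A =====
-- B replaces A's per-cell conditional accumulation with closed-form totals cost*req*cellCount (objective: simpler).
-- Both Pythons mutate the cell dicts in place identically; the equivalence proved here is about the return value.
def applyResources (field : List (List (List (String × Bool)))) (seedCost : Int) (waterCost : Int) (fertilizerCost : Int) (density : Int) (waterReq : Int) (fertReq : Int) : Int × Int × Int :=
  field.foldl (fun acc row =>
    row.foldl (fun acc cell =>
      -- cell['seeds'] = True; cell['water'] = True; cell['fertilizer'] = True
      let cell := PySem.Dict.insert (PySem.Dict.mk cell) "seeds" true
      let cell := PySem.Dict.insert cell "water" true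
      let cell := PySem.Dict.insert cell "fertilizer" true
      -- if cell['seeds']: … ; if cell['water']: … ; if cell['fertilizer']: …
      let acc := if PySem.Dict.getD cell "seeds" false then (acc.1 + seedCost * density, acc.2.1, acc.2.2) else acc
      let acc := if PySem.Dict.getD cell "water" false then (acc.1, acc.2.1 + waterCost * waterReq, acc.2.2) else acc
      if PySem.Dict.getD cell "fertilizer" false then (acc.1, acc.2.1, acc.2.2 + fertilizerCost * fertReq) else acc)
      acc)
    ((0 : Int), (0 : Int), (0 : Int))

-- ===== PORT B =====
-- Source B's marking loop is a pure side effect on the cell dicts; the returned value depends only on the cell count.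
def applyResources_alt (field : List (List (List (String × Bool)))) (seedCost : Int) (waterCost : Int) (fertilizerCost : Int) (density : Int) (waterReq : Int) (fertReq : Int) : Int × Int × Int :=
  let count : Int := field.foldl (fun c row => c + (row.length : Int)) 0
  (seedCost * density * count, waterCost * waterReq * count, fertilizerCost * fertReq * count)

-- ===== PRECONDITION & SPEC =====
def Spec_applyResources (field : List (List (List (String × Bool)))) (seedCost : Int) (waterCost : Int) (fertilizerCost : Int) (density : Int) (waterReq : Int) (fertReq : Int) (out : Int × Int × Int) : Prop := out = applyResources_alt field seedCost waterCost fertilizerCost density waterReq fertReq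
instance (field : List (List (List (String × Bool)))) (seedCost : Int) (waterCost : Int) (fertilizerCost : Int) (density : Int) (waterReq : Int) (fertReq : Int) (out : Int × Int × Int) : Decidable (Spec_applyResources field seedCost waterCost fertilizerCost density waterReq fertReq out) := by unfold Spec_applyResources; infer_instance

-- ===== CLAIM (what is proved, stated in full; the proofs are below) =====
def Claim_equal_applyResources : Prop := ∀ (field : List (List (List (String × Bool)))) (seedCost : Int) (waterCost : Int) (fertilizerCost : Int) (density : Int) (waterReq : Int) (fertReq : Int), Dom_applyResources field seedCost waterCost fertilizerCost density waterReq fertReq → Spec_applyResources field seedCost waterCost fertilizerCost density waterReq fertReq (applyResources field seedCost waterCost fertilizerCost density waterReq fertReq)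

-- ===== LEMMAS AND PROOFS =====

-- A's per-cell step always adds the three increments, whatever the cell was.
theorem applyResources_cell_step (seedCost waterCost fertilizerCost density waterReq fertReq : Int)
    (acc : Int × Int × Int) (cell : List (String × Bool)) :
    (let cell := PySem.Dict.insert (PySem.Dict.mk cell) "seeds" true
     let cell := PySem.Dict.insert cell "water" true
     let cell := PySem.Dict.insert cell "fertilizer" true
     let acc := if PySem.Dict.getD cell "seeds" false then (acc.1 + seedCost * density, acc.2.1, acc.2.2) else acc
     let acc := if PySem.Dict.getD cell "water" false then (acc.1, acc.2.1 + waterCost * waterReq, acc.2.2) else acc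
     if PySem.Dict.getD cell "fertilizer" false then (acc.1, acc.2.1, acc.2.2 + fertilizerCost * fertReq) else acc)
    = (acc.1 + seedCost * density, acc.2.1 + waterCost * waterReq, acc.2.2 + fertilizerCost * fertReq) := by
  simp [PySem.Dict.getD_insert_self, PySem.Dict.getD_insert_of_ne]

-- A's row fold from an arbitrary accumulator.
theorem applyResources_row (seedCost waterCost fertilizerCost density waterReq fertReq : Int)
    (row : List (List (String × Bool))) (acc : Int × Int × Int) :
    row.foldl (fun acc (cell : List (String × Bool)) =>
      let cell := PySem.Dict.insert (PySem.Dict.mk cell) "seeds" true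
      let cell := PySem.Dict.insert cell "water" true
      let cell := PySem.Dict.insert cell "fertilizer" true
      let acc := if PySem.Dict.getD cell "seeds" false then (acc.1 + seedCost * density, acc.2.1, acc.2.2) else acc
      let acc := if PySem.Dict.getD cell "water" false then (acc.1, acc.2.1 + waterCost * waterReq, acc.2.2) else acc
      if PySem.Dict.getD cell "fertilizer" false then (acc.1, acc.2.1, acc.2.2 + fertilizerCost * fertReq) else acc)
      acc
    = (acc.1 + seedCost * density * (row.length : Int),
       acc.2.1 + waterCost * waterReq * (row.length : Int),
       acc.2.2 + fertilizerCost * fertReq * (row.length : Int)) := by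
  induction row generalizing acc with
  | nil => simp
  | cons c cs ih =>
    rw [List.foldl_cons, applyResources_cell_step, ih]
    simp
    refine ⟨by ring, by ring, by ring⟩

-- Shifting the initial accumulator of the cell-count fold.
theorem applyResources_count_shift (rs : List (List (List (String × Bool)))) (c0 : Int) :
    rs.foldl (fun c (row : List (List (String × Bool))) => c + (row.length : Int)) c0
    = c0 + rs.foldl (fun c row => c + (row.length : Int)) 0 := by
  induction rs generalizing c0 with
  | nil => simp
  | cons x xs ihx =>
    rw [List.foldl_cons, List.foldl_cons, ihx, ihx ((0 : Int) + (x.length : Int))]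
    ring

theorem applyResources_field (seedCost waterCost fertilizerCost density waterReq fertReq : Int)
    (field : List (List (List (String × Bool)))) (acc : Int × Int × Int) :
    field.foldl (fun acc row =>
      row.foldl (fun acc (cell : List (String × Bool)) =>
        let cell := PySem.Dict.insert (PySem.Dict.mk cell) "seeds" true
        let cell := PySem.Dict.insert cell "water" true
        let cell := PySem.Dict.insert cell "fertilizer" true
        let acc := if PySem.Dict.getD cell "seeds" false then (acc.1 + seedCost * density, acc.2.1, acc.2.2) else acc
        let acc := if PySem.Dict.getD cell "water" false then (acc.1, acc.2.1 + waterCost * waterReq, acc.2.2) else acc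
        if PySem.Dict.getD cell "fertilizer" false then (acc.1, acc.2.1, acc.2.2 + fertilizerCost * fertReq) else acc)
        acc)
      acc
    = (acc.1 + seedCost * density * (field.foldl (fun c row => c + (row.length : Int)) 0),
       acc.2.1 + waterCost * waterReq * (field.foldl (fun c row => c + (row.length : Int)) 0),
       acc.2.2 + fertilizerCost * fertReq * (field.foldl (fun c row => c + (row.length : Int)) 0)) := by
  induction field generalizing acc with
  | nil => simp
  | cons r rs ih =>
    rw [List.foldl_cons, applyResources_row, ih, List.foldl_cons,
        applyResources_count_shift rs ((0 : Int) + (r.length : Int))]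
    refine Prod.ext (by ring) (Prod.ext (by ring) (by ring))

-- ===== VERDICT (by name: the statement is the Claim_ definition above) =====
theorem applyResources_spec : Claim_equal_applyResources := by
  intro field seedCost waterCost fertilizerCost density waterReq fertReq _
  unfold Spec_applyResources applyResources applyResources_alt
  rw [applyResources_field]
  simp
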